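-- pv_equiv track=rewrite | github.com/FanchenBao/leetcode | 2021_04_challenge/04_05_2021.py | isIdealPermutation
-- ===== SOURCE A (Python) =====
-- from typing import List
--
-- def isIdealPermutation(A: List[int]) -> bool:
--     """TLE. But don't worry, this is expected"""
--     N = len(A)
--     if N <= 2:
--         return True
--     for d in range(2, N):
--         for i in range(N - d):
--             if A[i] > A[i + d]:
--                 return False
--     return True
-- ===== SOURCE B (Python) =====
-- def isIdealPermutation(A):
--     # One pass: a non-adjacent inversion exists iff some element is smaller
--     # than the maximum of the elements at least two positions before it.
--     if len(A) <= 2: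
--         return True
--     m = A[0]
--     for i in range(2, len(A)):
--         if m > A[i]:
--             return False
--         m = max(m, A[i - 1])
--     return True
-- ===== Notes on version B (the rewrite author's own statement) =====
-- stated objective: faster
-- what changed: Replaced the double loop over all index gaps d>=2 by a single left-to-right pass that maintains the running maximum of elements at least two positions back and compares it to the current element.
import Mathlib
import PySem

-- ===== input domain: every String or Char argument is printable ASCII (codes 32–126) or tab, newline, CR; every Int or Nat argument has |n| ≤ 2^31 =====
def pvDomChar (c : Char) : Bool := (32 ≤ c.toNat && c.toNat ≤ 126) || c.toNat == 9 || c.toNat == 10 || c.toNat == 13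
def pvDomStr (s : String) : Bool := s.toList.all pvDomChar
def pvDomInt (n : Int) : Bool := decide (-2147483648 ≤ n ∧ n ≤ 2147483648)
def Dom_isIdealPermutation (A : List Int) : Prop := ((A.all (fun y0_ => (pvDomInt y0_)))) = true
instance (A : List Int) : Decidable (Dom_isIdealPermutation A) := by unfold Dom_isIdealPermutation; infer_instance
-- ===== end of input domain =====

-- B replaces A's O(n^2) double loop over all gaps d ≥ 2 by one O(n) pass tracking the
-- running maximum of the elements at least two positions back (objective: faster).

-- ===== PORT A =====
def isIdealPermutation (A : List Int) : Bool :=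
  let N : Int := A.length
  if N ≤ 2 then true
  else
    (PySem.List.pyRange 2 N 1).foldl (fun ok d =>
      (PySem.List.pyRange 0 (N - d) 1).foldl (fun ok2 i =>
        if ok2 then
          if PySem.List.pyGetD A i 0 > PySem.List.pyGetD A (i + d) 0 then false
          else true
        else false) ok) true

-- ===== PORT B =====
-- loop body of Source B: m = running max of elements at least two positions back, prev = previous element
def altGo (xs : List Int) (m prev : Int) : Bool :=
  match xs with
  | [] => true
  | x :: rest => if m > x then false else altGo rest (max m prev) x

def isIdealPermutation_alt (A : List Int) : Bool :=
  match A with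
  | a :: b :: rest => altGo rest a b
  | _ => true

-- ===== PRECONDITION & SPEC =====
def Spec_isIdealPermutation (A : List Int) (out : Bool) : Prop := out = isIdealPermutation_alt A
instance (A : List Int) (out : Bool) : Decidable (Spec_isIdealPermutation A out) := by unfold Spec_isIdealPermutation; infer_instance

-- ===== CLAIM (what is proved, stated in full; the proofs are below) =====
def Claim_equal_isIdealPermutation : Prop := ∀ (A : List Int), Dom_isIdealPermutation A → Spec_isIdealPermutation A (isIdealPermutation A)

-- ===== LEMMAS AND PROOFS =====

-- a foldl that short-circuits to false is an 'all'
theorem foldl_and_all {α : Type} (l : List α) (c : α → Bool) (b : Bool) :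
    l.foldl (fun ok x => ok && c x) b = (b && l.all c) := by
  induction l generalizing b with
  | nil => simp
  | cons x xs ih => cases b <;> simp [List.foldl, ih]

theorem foldl_max_le (l : List Int) (m x : Int) :
    l.foldl max m ≤ x ↔ m ≤ x ∧ ∀ y ∈ l, y ≤ x := by
  induction l generalizing m with
  | nil => simp
  | cons a l ih => simp [List.foldl, ih, and_assoc]

-- the common mathematical characterisation: no inversion across a gap of at least 2
def NoFarInv (A : List Int) : Prop :=
  ∀ i j : Nat, i + 2 ≤ j → j < A.length → A.getD i 0 ≤ A.getD j 0

theorem A_true_iff (A : List Int) : isIdealPermutation A = true ↔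
    (∀ d : Int, 2 ≤ d → d < (A.length : Int) →
      ∀ i : Int, 0 ≤ i → i < (A.length : Int) - d →
        PySem.List.pyGetD A i 0 ≤ PySem.List.pyGetD A (i + d) 0) := by
  unfold isIdealPermutation
  by_cases h : (A.length : Int) ≤ 2
  · simp only [h, if_true, true_iff]
    intro d hd hdN
    exact absurd hdN (by omega)
  · simp only [h, if_false]
    simp only [show ∀ (a b : Bool), (if a then b else false) = (a && b) from by decide,
      foldl_and_all, Bool.true_and, List.all_eq_true, PySem.List.mem_pyRange_one]
    constructor
    · intro hall d hd hdN i hi hiN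
      have h2 := hall d ⟨hd, hdN⟩ i ⟨hi, hiN⟩
      by_contra hc
      rw [if_pos (by omega)] at h2
      exact absurd h2 (by simp)
    · intro hall d hd i hi
      rw [if_neg (by have := hall d hd.1 hd.2 i hi.1 hi.2; omega)]

theorem A_iff_noFarInv (A : List Int) : isIdealPermutation A = true ↔ NoFarInv A := by
  rw [A_true_iff]
  constructor
  · intro h i j hij hj
    have hj' : (j : Int) < A.length := by exact_mod_cast hj
    have hij' : (i : Int) + 2 ≤ (j : Int) := by exact_mod_cast hij
    have h2 := h ((j : Int) - (i : Int)) (by omega) (by omega) (i : Int) (by omega) (by omega)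
    have e : (i : Int) + ((j : Int) - (i : Int)) = (j : Int) := by ring
    rw [e] at h2
    simpa using h2
  · intro h d hd hdN i hi hiN
    lift d to ℕ using (by omega : (0:Int) ≤ d) with d'
    lift i to ℕ using hi with i'
    have h1 : 2 ≤ d' := by exact_mod_cast hd
    have h2 : i' + d' < A.length := by
      have : (i' : Int) + (d' : Int) < (A.length : Int) := by omega
      exact_mod_cast this
    have := h i' (i' + d') (by omega) h2
    have e1 : PySem.List.pyGetD A (i' : Int) 0 = A.getD i' 0 := by
      rw [PySem.List.pyGetD_natCast]
    have e2 : PySem.List.pyGetD A ((i' : Int) + (d' : Int)) 0 = A.getD (i' + d') 0 := by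
      rw [show (i' : Int) + (d' : Int) = ((i' + d' : Nat) : Int) from by push_cast; ring,
        PySem.List.pyGetD_natCast]
    rw [e1, e2]
    exact this

theorem altGo_true_iff (xs : List Int) (m prev : Int) :
    altGo xs m prev = true ↔
      ∀ k, (h : k < xs.length) → ((prev :: xs).take k).foldl max m ≤ xs[k] := by
  induction xs generalizing m prev with
  | nil => simp [altGo]
  | cons x rest ih =>
    by_cases hmx : m > x
    · simp only [altGo, if_pos hmx]
      constructor
      · intro h; cases h
      · intro h
        have := h 0 (by simp)
        simp at this
        omega
    · simp only [altGo, if_neg hmx, ih]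
      constructor
      · intro h k hk
        match k with
        | 0 => simpa using (by omega : m ≤ x)
        | Nat.succ k' =>
          have hk' : k' < rest.length := by simpa using hk
          have := h k' hk'
          simpa [List.foldl] using this
      · intro h k hk
        have := h (k + 1) (by simpa using Nat.succ_lt_succ hk)
        simpa [List.foldl] using this

theorem B_iff_noFarInv (A : List Int) : isIdealPermutation_alt A = true ↔ NoFarInv A := by
  match A with
  | [] =>
    constructor
    · intro _ i j hij hj; simp at hj
    · intro _; rfl
  | [a] =>
    constructor
    · intro _ i j hij hj; simp at hj; omega
    · intro _; rfl
  | a :: b :: rest =>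
    show altGo rest a b = true ↔ _
    rw [altGo_true_iff]
    constructor
    · intro h i j hij hj
      match j, hij with
      | Nat.succ (Nat.succ k), _ =>
        have hk : k < rest.length := by simpa using hj
        have h2 := h k hk
        rw [foldl_max_le] at h2
        have hv : (a :: b :: rest).getD (k + 2) 0 = rest[k] := by
          simp [List.getD_eq_getElem?_getD, List.getElem?_eq_getElem hk]
        rw [hv]
        match i with
        | 0 => exact h2.1
        | Nat.succ i' =>
          have hi' : i' < k := by omega
          have hmem : (a :: b :: rest).getD (i' + 1) 0 ∈ (b :: rest).take k := by
            have hi'' : i' < (b :: rest).length := by simp; omega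
            have : (a :: b :: rest).getD (i' + 1) 0 = (b :: rest)[i'] := by
              simp [List.getD_eq_getElem?_getD, List.getElem?_eq_getElem hi'']
            rw [this]
            exact List.mem_take_iff_getElem.mpr ⟨i', by simp; omega, rfl⟩
          exact h2.2 _ hmem
    · intro h k hk
      rw [foldl_max_le]
      have hv : rest[k] = (a :: b :: rest).getD (k + 2) 0 := by
        simp [List.getD_eq_getElem?_getD, List.getElem?_eq_getElem hk]
      constructor
      · rw [hv]; exact h 0 (k + 2) (by omega) (by simp; omega)
      · intro y hy
        rw [List.mem_take_iff_getElem] at hy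
        obtain ⟨t, ht, rfl⟩ := hy
        have ht' : t < (b :: rest).length := by omega
        rw [hv]
        have hgd : (b :: rest)[t]'ht' = (a :: b :: rest).getD (t + 1) 0 := by
          simp [List.getD_eq_getElem?_getD, List.getElem?_eq_getElem ht']
        rw [hgd]
        exact h (t + 1) (k + 2) (by omega) (by simp; omega)

-- ===== VERDICT (by name: the statement is the Claim_ definition above) =====
theorem isIdealPermutation_spec : Claim_equal_isIdealPermutation := by
  intro A _
  unfold Spec_isIdealPermutation
  have h := (A_iff_noFarInv A).trans (B_iff_noFarInv A).symm
  cases ha : isIdealPermutation A <;> cases hb : isIdealPermutation_alt A <;>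
    simp_all
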